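-- pv_equiv track=rewrite | github.com/angch/adventofcode | 2017-09/opcode0x90/day9.py | part2
-- ===== SOURCE A (Python) =====
-- def part2(data):
--     it = iter(data.strip())
--     count = 0
--
--     for c in it:
--         if c == '!':
--             # skip the next char
--             next(it)
--         # elif c == '{':
--         #     depth += 1
--         #     stack.append(depth)
--         # elif c == '}':
--         #     depth -= 1
--         elif c == '<':
--             # begin special loop to consume the iterator until we find the next valid '>' char
--             for d in it:
--                 if d == '!':
--                     # skip the next char
--                     next(it)
--                     continue
--                 elif d == '>':
--                     break
--                 count += 1
--             else:
--                 # this is not supposed to happen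
--                 raise ValueError("EOF reached while finding the end of <>")
--
--     return count
-- ===== SOURCE B (Python) =====
-- def part2(data):
--     # One flat pass with state flags instead of nested iterator loops.
--     count = 0
--     in_garbage = False
--     skip = False
--     for c in data.strip():
--         if skip:
--             skip = False
--         elif c == '!':
--             skip = True
--         elif in_garbage:
--             if c == '>':
--                 in_garbage = False
--             else:
--                 count += 1
--         elif c == '<':
--             in_garbage = True
--     if in_garbage:
--         raise ValueError("EOF reached while finding the end of <>")
--     return count
-- ===== Notes on version B (the rewrite author's own statement) =====
-- stated objective: simpler
-- what changed: Replaced A's nested iterator loops (outer loop plus a dedicated inner garbage-consuming loop with explicit next() skips) by a single flat for-loop carrying skip/in_garbage boolean flags and one counter; Pre_ excludes exactly the inputs on which A raises (a trailing cancel '!' -> StopIteration, an unterminated '<' garbage section -> ValueError).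
-- outside the precondition, e.g. on part2('!'): A raises StopIteration, B returns 0
import Mathlib
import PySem

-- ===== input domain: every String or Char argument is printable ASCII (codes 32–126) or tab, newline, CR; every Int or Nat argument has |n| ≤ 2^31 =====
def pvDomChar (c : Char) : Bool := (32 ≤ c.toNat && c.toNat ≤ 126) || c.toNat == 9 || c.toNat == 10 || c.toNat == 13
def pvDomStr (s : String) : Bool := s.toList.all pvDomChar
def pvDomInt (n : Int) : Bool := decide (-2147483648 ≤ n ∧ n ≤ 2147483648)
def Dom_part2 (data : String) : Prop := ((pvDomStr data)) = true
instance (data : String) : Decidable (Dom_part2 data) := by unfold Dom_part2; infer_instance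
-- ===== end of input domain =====

-- B replaces A's nested iterator loops (outer loop + dedicated garbage-consuming inner loop
-- with explicit next() skips) by a single flat fold carrying (skip, in_garbage, count) flags;
-- objective: simpler. Pre_ excludes exactly the inputs on which A raises.


-- ===== PORT A =====
-- A's outer for-loop and its inner garbage-consuming for-loop, as two mutually
-- recursive functions; `none` marks the places where the Python raises
-- (StopIteration from `next(it)` at EOF, ValueError from the inner for-else).
mutual
def part2Outer : List Char → Int → Option Int
  | [], count => some count
  | c :: rest, count =>
    if c = '!' then
      match rest with
      | [] => none                    -- next(it) raises StopIteration
      | _ :: r => part2Outer r count  -- skip the next char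
    else if c = '<' then part2Inner rest count
    else part2Outer rest count
termination_by l _ => l.length
def part2Inner : List Char → Int → Option Int
  | [], _ => none                     -- for-else: ValueError
  | d :: rest, count =>
    if d = '!' then
      match rest with
      | [] => none                    -- next(it) raises StopIteration
      | _ :: r => part2Inner r count
    else if d = '>' then part2Outer rest count
    else part2Inner rest (count + 1)
termination_by l _ => l.length
end

def part2 (data : String) : Int :=
  (part2Outer (PySem.Str.strip data).toList 0).getD 0

-- ===== PORT B =====
-- one step of B's single for-loop over the stripped string: state = (skip, in_garbage, count)
def part2Step (st : Bool × Bool × Int) (c : Char) : Bool × Bool × Int :=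
  if st.1 then (false, st.2.1, st.2.2)
  else if c = '!' then (true, st.2.1, st.2.2)
  else if st.2.1 then (if c = '>' then (false, false, st.2.2) else (false, true, st.2.2 + 1))
  else if c = '<' then (false, true, st.2.2)
  else (false, false, st.2.2)

def part2_alt (data : String) : Int :=
  let st := (PySem.Str.strip data).toList.foldl part2Step (false, false, 0)
  if st.2.1 then 0 else st.2.2    -- B raises ValueError when still in garbage at EOF

-- ===== PRECONDITION & SPEC =====
-- closed-form validity state machine over the input (computes no output of either program):
-- every '!' is followed by a character, and every garbage section opened by '<' is closed by '>'
def goodG : List Char → Bool → Bool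
  | [], g => !g
  | c :: rest, g =>
    if c = '!' then
      match rest with
      | [] => false
      | _ :: r => goodG r g
    else if g then (if c = '>' then goodG rest false else goodG rest true)
    else if c = '<' then goodG rest true
    else goodG rest false

-- Pre_ excludes exactly the inputs on which A raises: a '!' as the last effective character
-- (StopIteration from next(it)) or an unterminated '<…' garbage section (ValueError).
def Pre_part2 (data : String) : Prop :=
  goodG (PySem.Str.strip data).toList false = true
instance (data : String) : Decidable (Pre_part2 data) := by unfold Pre_part2; infer_instance

def pvWitness_part2 : String := "<>"

def Spec_part2 (data : String) (out : Int) : Prop := out = part2_alt data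
instance (data : String) (out : Int) : Decidable (Spec_part2 data out) := by unfold Spec_part2; infer_instance

-- ===== CLAIM (what is proved, stated in full; the proofs are below) =====
def Claim_equal_part2 : Prop := ∀ (data : String), Dom_part2 data → Pre_part2 data → Spec_part2 data (part2 data)

-- ===== LEMMAS AND PROOFS =====

-- key invariant: on a valid suffix, A's current loop (inner iff g) returns exactly the count
-- accumulated by B's fold started in state (false, g, cnt), and B's fold ends out of garbage
lemma part2_key : ∀ (n : Nat) (l : List Char), l.length ≤ n → ∀ (g : Bool) (cnt : Int),
    goodG l g = true →
    (if g then part2Inner l cnt else part2Outer l cnt)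
      = some ((l.foldl part2Step (false, g, cnt)).2.2)
    ∧ (l.foldl part2Step (false, g, cnt)).2.1 = false := by
  intro n
  induction n with
  | zero =>
    intro l hl g cnt hg
    have : l = [] := List.length_eq_zero_iff.mp (Nat.le_zero.mp hl)
    subst this
    rw [goodG.eq_def] at hg; simp at hg
    subst hg
    rw [part2Outer.eq_def]; simp
  | succ n ih =>
    intro l hl g cnt hg
    cases l with
    | nil =>
      rw [goodG.eq_def] at hg; simp at hg
      subst hg
      rw [part2Outer.eq_def]; simp
    | cons c rest =>
      by_cases hbang : c = '!'
      · subst hbang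
        cases rest with
        | nil => rw [goodG.eq_def] at hg; simp at hg
        | cons x r =>
          have hr : r.length ≤ n := by simp at hl; omega
          have hgr : goodG r g = true := by rw [goodG.eq_def] at hg; simpa using hg
          have eF : List.foldl part2Step (false, g, cnt) ('!' :: x :: r)
              = List.foldl part2Step (false, g, cnt) r := by
            simp [List.foldl, part2Step]
          rw [eF]
          cases g with
          | false =>
            have eA : part2Outer ('!' :: x :: r) cnt = part2Outer r cnt := by
              rw [part2Outer.eq_def]; simp
            simpa [eA] using ih r hr false cnt hgr
          | true =>
            have eI : part2Inner ('!' :: x :: r) cnt = part2Inner r cnt := by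
              rw [part2Inner.eq_def]; simp
            simpa [eI] using ih r hr true cnt hgr
      · have hrest : rest.length ≤ n := by simp at hl; omega
        cases g with
        | true =>
          by_cases hc : c = '>'
          · subst hc
            have hgr : goodG rest false = true := by rw [goodG.eq_def] at hg; simpa using hg
            have := ih rest hrest false cnt hgr
            simpa [part2Inner.eq_def, part2Step, List.foldl, hbang] using this
          · have hgr : goodG rest true = true := by rw [goodG.eq_def] at hg; simpa [hbang, hc] using hg
            have eI : part2Inner (c :: rest) cnt = part2Inner rest (cnt + 1) := by
              rw [part2Inner.eq_def]; simp [hbang, hc]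
            have eS : part2Step (false, true, cnt) c = (false, true, cnt + 1) := by
              simp [part2Step, hbang, hc]
            simpa [eI, eS, List.foldl] using ih rest hrest true (cnt + 1) hgr
        | false =>
          by_cases hc : c = '<'
          · subst hc
            have hgr : goodG rest true = true := by rw [goodG.eq_def] at hg; simpa [hbang] using hg
            have eO : part2Outer ('<' :: rest) cnt = part2Inner rest cnt := by
              rw [part2Outer.eq_def]; simp
            simpa [eO, part2Step, List.foldl] using ih rest hrest true cnt hgr
          · have hgr : goodG rest false = true := by rw [goodG.eq_def] at hg; simpa [hbang, hc] using hg
            have eO : part2Outer (c :: rest) cnt = part2Outer rest cnt := by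
              rw [part2Outer.eq_def]; simp [hbang, hc]
            have eS : part2Step (false, false, cnt) c = (false, false, cnt) := by
              simp [part2Step, hbang, hc]
            simpa [eO, eS, List.foldl] using ih rest hrest false cnt hgr

-- ===== VERDICT (by name: the statement is the Claim_ definition above) =====
theorem part2_spec : Claim_equal_part2 := by
  intro data _ hpre
  unfold Spec_part2 part2 part2_alt
  have h := part2_key (PySem.Str.strip data).toList.length (PySem.Str.strip data).toList
    (le_refl _) false 0 hpre
  simp only [Bool.false_eq_true, if_false, PySem.Str.toList_strip] at h ⊢
  rw [h.1]
  simp [h.2]
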